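-- pv_equiv track=rewrite | github.com/AMICI-dev/AMICI | python/sdist/amici/jax/petab.py | _parse_parameter_name
-- ===== SOURCE A (Python) =====
-- def _parse_parameter_name(
--     pname: str, model_pars: dict
-- ) -> list[tuple[str, str]]:
--     """
--     Parse parameter name to determine which layers and attributes to set.
--
--     :param pname:
--         Parameter name from PEtab (format: net.layer.attribute)
--     :param model_pars:
--         Model parameters dictionary
--
--     :return:
--         List of (layer_name, attribute_name) tuples to set
--     """
--     net = pname.split("_")[0]
--     nn = model_pars[net]
--     to_set = []
--
--     name_parts = pname.split(".")
--
--     if len(name_parts) > 1: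
--         layer_name = name_parts[1]
--         layer = nn[layer_name]
--         if len(name_parts) > 2:
--             # Specific attribute specified
--             attribute_name = name_parts[2]
--             to_set.append((layer_name, attribute_name))
--         else:
--             # All attributes of the layer
--             to_set.extend(
--                 [(layer_name, attribute) for attribute in layer.keys()]
--             )
--     else:
--         # All layers and attributes
--         to_set.extend(
--             [
--                 (layer_name, attribute)
--                 for layer_name, layer in nn.items()
--                 for attribute in layer.keys()
--             ]
--         )
--
--     return to_set
-- ===== SOURCE B (Python) =====
-- def _parse_parameter_name(
--     pname: str, model_pars: dict
-- ) -> list[tuple[str, str]]: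
--     """Enumerate-then-select: build the full (layer, attribute) cross product
--     of the network once, then select from it according to the name's depth."""
--     nn = model_pars[pname.split("_")[0]]
--     name_parts = pname.split(".")
--     pairs = [
--         (layer_name, attribute)
--         for layer_name, layer in nn.items()
--         for attribute in layer.keys()
--     ]
--     if len(name_parts) == 1:
--         return pairs
--     if len(name_parts) == 2:
--         return [p for p in pairs if p[0] == name_parts[1]]
--     return [(name_parts[1], name_parts[2])]
-- ===== Notes on version B (the rewrite author's own statement) =====
-- stated objective: alternative
-- what changed: B replaces A's branch-then-enumerate structure (lookup the layer, then enumerate its attributes, with a separate nested comprehension for the all-layers case) by enumerate-then-select: it always builds the full (layer, attribute) cross product of the network once and then returns it whole, filters it by the requested layer name, or ignores it for a fully specified name.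
import Mathlib
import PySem

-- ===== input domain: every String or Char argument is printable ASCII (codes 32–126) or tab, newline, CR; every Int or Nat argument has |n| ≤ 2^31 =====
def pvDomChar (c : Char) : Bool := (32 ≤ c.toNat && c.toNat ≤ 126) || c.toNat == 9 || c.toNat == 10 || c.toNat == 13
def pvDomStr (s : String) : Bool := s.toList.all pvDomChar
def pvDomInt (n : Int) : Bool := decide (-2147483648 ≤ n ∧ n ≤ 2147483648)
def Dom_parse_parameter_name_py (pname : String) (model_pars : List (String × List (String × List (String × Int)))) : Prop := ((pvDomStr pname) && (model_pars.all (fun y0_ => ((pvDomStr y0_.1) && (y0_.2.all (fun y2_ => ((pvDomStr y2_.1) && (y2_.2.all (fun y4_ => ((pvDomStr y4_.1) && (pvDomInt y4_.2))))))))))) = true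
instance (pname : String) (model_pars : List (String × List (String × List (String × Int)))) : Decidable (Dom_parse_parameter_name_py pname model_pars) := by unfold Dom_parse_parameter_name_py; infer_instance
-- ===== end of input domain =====

-- B builds the full (layer, attribute) cross product of the network once and then
-- selects from it (whole / filtered by layer name / replaced by the literal pair),
-- instead of A's branch-then-enumerate (alternative decomposition; return value only).

-- d[k] for a Python dict given as an association list (none = KeyError).
def pvGetItem? {α : Type} (d : List (String × α)) (k : String) : Option α :=
  (PySem.Dict.mk d).get? k

-- ===== PORT A =====
def parse_parameter_name_py (pname : String) (model_pars : List (String × List (String × List (String × Int)))) : List (String × String) :=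
  -- net = pname.split("_")[0]  (split with a nonempty separator never raises and never
  -- returns an empty list, so the getD defaults below are never taken)
  let net : String := ((PySem.Str.split? pname "_").getD []).headD ""
  -- nn = model_pars[net]  (KeyError excluded by Pre_)
  let nn : List (String × List (String × Int)) := (pvGetItem? model_pars net).getD []
  let name_parts : List String := (PySem.Str.split? pname ".").getD []
  if name_parts.length > 1 then
    let layer_name : String := (name_parts[1]?).getD ""
    -- layer = nn[layer_name]  (KeyError excluded by Pre_)
    let layer : List (String × Int) := (pvGetItem? nn layer_name).getD []
    if name_parts.length > 2 then
      -- to_set.append((layer_name, attribute_name))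
      [(layer_name, (name_parts[2]?).getD "")]
    else
      -- [(layer_name, attribute) for attribute in layer.keys()]
      layer.map (fun p => (layer_name, p.1))
  else
    -- [(layer_name, attribute) for layer_name, layer in nn.items() for attribute in layer.keys()]
    nn.flatMap (fun q => q.2.map (fun p => (q.1, p.1)))

-- ===== PORT B =====
def parse_parameter_name_py_alt (pname : String) (model_pars : List (String × List (String × List (String × Int)))) : List (String × String) :=
  -- nn = model_pars[pname.split("_")[0]]  (KeyError excluded by Pre_)
  let nn : List (String × List (String × Int)) :=
    (pvGetItem? model_pars (((PySem.Str.split? pname "_").getD []).headD "")).getD []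
  let name_parts : List String := (PySem.Str.split? pname ".").getD []
  -- pairs = [(layer_name, attribute) for layer_name, layer in nn.items() for attribute in layer.keys()]
  let pairs : List (String × String) := nn.flatMap (fun q => q.2.map (fun p => (q.1, p.1)))
  if name_parts.length == 1 then
    pairs
  else if name_parts.length == 2 then
    -- [p for p in pairs if p[0] == name_parts[1]]
    pairs.filter (fun p => p.1 == (name_parts[1]?).getD "")
  else
    [((name_parts[1]?).getD "", (name_parts[2]?).getD "")]

-- ===== PRECONDITION & SPEC =====
-- Pre_ excludes exactly the KeyError inputs (net not a key of model_pars; or, when the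
-- name has a dot, name_parts[1] not a key of nn), and it states the dict shape of nn
-- (no duplicate layer keys) — a Python dict cannot carry duplicate keys, so this
-- excludes nothing a real call can pass.
def Pre_parse_parameter_name_py (pname : String) (model_pars : List (String × List (String × List (String × Int)))) : Prop :=
  (∀ q ∈ model_pars, (q.2.map Prod.fst).Nodup) ∧
  (((PySem.Str.split? pname "_").getD []).headD "") ∈ model_pars.map Prod.fst ∧
  (let name_parts := (PySem.Str.split? pname ".").getD []
   name_parts.length > 1 →
     ((name_parts[1]?).getD "") ∈
       ((pvGetItem? model_pars (((PySem.Str.split? pname "_").getD []).headD "")).getD []).map Prod.fst)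
instance (pname : String) (model_pars : List (String × List (String × List (String × Int)))) : Decidable (Pre_parse_parameter_name_py pname model_pars) := by unfold Pre_parse_parameter_name_py; infer_instance

def pvWitness_parse_parameter_name_py : String × (List (String × List (String × List (String × Int)))) :=
  ("net_ps.l1", [("net", [("l1", [("w", 2)]), ("l2", [("b", 3)])])])

def Spec_parse_parameter_name_py (pname : String) (model_pars : List (String × List (String × List (String × Int)))) (out : List (String × String)) : Prop := out = parse_parameter_name_py_alt pname model_pars
instance (pname : String) (model_pars : List (String × List (String × List (String × Int)))) (out : List (String × String)) : Decidable (Spec_parse_parameter_name_py pname model_pars out) := by unfold Spec_parse_parameter_name_py; infer_instance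

-- ===== CLAIM (what is proved, stated in full; the proofs are below) =====
def Claim_equal_parse_parameter_name_py : Prop := ∀ (pname : String) (model_pars : List (String × List (String × List (String × Int)))), Dom_parse_parameter_name_py pname model_pars → Pre_parse_parameter_name_py pname model_pars → Spec_parse_parameter_name_py pname model_pars (parse_parameter_name_py pname model_pars)

-- ===== LEMMAS AND PROOFS =====

-- splitOn's worker always produces at least one piece.
theorem go_ne_nil (sep : List Char) : ∀ (fuel : Nat) (l cur : List Char) (acc : List (List Char)), PySem.Chars.splitOn.go sep fuel l cur acc ≠ [] := by
  intro fuel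
  induction fuel with
  | zero => intro l cur acc; simp [PySem.Chars.splitOn.go]
  | succ n ih =>
    intro l cur acc
    cases l with
    | nil => simp [PySem.Chars.splitOn.go]
    | cons c rest =>
      rw [PySem.Chars.splitOn.go]
      split_ifs
      · exact ih _ _ _
      · exact ih _ _ _

-- s.split(".") is never the empty list.
theorem split_len (s : String) : 1 ≤ ((PySem.Str.split? s ".").getD []).length := by
  simp only [PySem.Str.split?, PySem.Chars.split?]
  split_ifs with hif
  · exact absurd hif (by decide)
  · simp only [Option.map_some, Option.getD_some, List.length_map, PySem.Chars.splitOn]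
    have := go_ne_nil (".".toList) (s.toList.length + 1) s.toList [] []
    rcases hx : PySem.Chars.splitOn.go (".".toList) (s.toList.length + 1) s.toList [] [] with _ | _
    · exact absurd hx this
    · simp

-- A key absent from the association list contributes nothing to the filtered cross product.
theorem filter_flatMap_not_mem {α : Type} (d : List (String × List (String × α))) (t : String)
    (h : t ∉ d.map Prod.fst) :
    (d.flatMap (fun q => q.2.map (fun p => (q.1, p.1)))).filter (fun pr => pr.1 == t) = [] := by
  induction d with
  | nil => simp
  | cons hd tl ih =>
    simp only [List.map_cons, List.mem_cons, not_or] at h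
    obtain ⟨hne, htl⟩ := h
    simp only [List.flatMap_cons, List.filter_append, ih htl, List.append_nil]
    rw [List.filter_eq_nil_iff]
    intro a ha
    obtain ⟨p, _, rfl⟩ := List.mem_map.mp ha
    simpa using Ne.symm hne

-- Filtering the full cross product by a layer name rebuilds that layer's attribute
-- list (first-match lookup), given duplicate-free layer keys.
theorem filter_flatMap_eq_lookup {α : Type} (d : List (String × List (String × α))) (t : String)
    (hnd : (d.map Prod.fst).Nodup) :
    (d.flatMap (fun q => q.2.map (fun p => (q.1, p.1)))).filter (fun pr => pr.1 == t)
      = ((pvGetItem? d t).getD []).map (fun p => (t, p.1)) := by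
  induction d with
  | nil => simp [pvGetItem?, PySem.Dict.get?]
  | cons hd tl ih =>
    obtain ⟨k, v⟩ := hd
    simp only [List.map_cons] at hnd
    obtain ⟨hne, hnd'⟩ := List.nodup_cons.mp hnd
    by_cases hk : k = t
    · subst hk
      have hget : pvGetItem? ((k, v) :: tl) k = some v := by
        simp [pvGetItem?, PySem.Dict.get?_mk_cons]
      simp only [List.flatMap_cons, List.filter_append, hget, Option.getD_some]
      rw [filter_flatMap_not_mem tl k hne]
      simp only [List.filter_map, List.append_nil]
      have : ((fun pr => pr.1 == k) ∘ fun p : String × α => (k, p.1)) = fun _ => true := by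
        funext p; simp
      rw [this, List.filter_true]
    · have hget : pvGetItem? ((k, v) :: tl) t = pvGetItem? tl t := by
        simp [pvGetItem?, PySem.Dict.get?_mk_cons, hk]
      simp only [List.flatMap_cons, List.filter_append, hget, ← ih hnd']
      have : (v.map (fun p => (k, p.1))).filter (fun pr => pr.1 == t) = [] := by
        rw [List.filter_eq_nil_iff]
        intro a ha
        obtain ⟨p, _, rfl⟩ := List.mem_map.mp ha
        simpa using hk
      simp [this]

-- ===== VERDICT (by name: the statement is the Claim_ definition above) =====
theorem parse_parameter_name_py_spec : Claim_equal_parse_parameter_name_py := by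
  intro pname model_pars _hdom hpre
  obtain ⟨hnod, hnet, _h1⟩ := hpre
  unfold Spec_parse_parameter_name_py parse_parameter_name_py parse_parameter_name_py_alt
  set net := ((PySem.Str.split? pname "_").getD []).headD "" with hnetdef
  set nn := (pvGetItem? model_pars net).getD [] with hnn
  set name_parts := (PySem.Str.split? pname ".").getD [] with hnp
  have hnodnn : (nn.map Prod.fst).Nodup := by
    rcases hmem : pvGetItem? model_pars net with _ | v
    · simp [hnn, hmem]
    · have : (net, v) ∈ (PySem.Dict.mk model_pars).items :=
        PySem.Dict.mem_items_of_get?_eq_some (PySem.Dict.mk model_pars) (by simpa [pvGetItem?] using hmem)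
      simp only [hnn, hmem, Option.getD_some]
      exact hnod (net, v) this
  by_cases h1 : name_parts.length > 1
  · by_cases h2 : name_parts.length > 2
    · have e1 : (name_parts.length == 1) = false := by simp; omega
      have e2 : (name_parts.length == 2) = false := by simp; omega
      simp [h1, h2, e1, e2]
    · have hlen : name_parts.length = 2 := by omega
      have e1 : (name_parts.length == 1) = false := by simp [hlen]
      have e2 : (name_parts.length == 2) = true := by simp [hlen]
      simp only [h1, if_true, h2, if_false, e1, Bool.false_eq_true, e2, if_true, ← hnn]
      rw [filter_flatMap_eq_lookup nn ((name_parts[1]?).getD "") hnodnn]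
  · -- name_parts = pname.split(".") is never empty, so here its length is exactly 1
    have hge := split_len pname
    rw [← hnp] at hge
    have e1 : (name_parts.length == 1) = true := by simp; omega
    simp [h1, e1, ← hnn]
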